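-- pv_equiv track=rewrite | github.com/synvanalt/woos-nwn-parser | app/parser.py | parse_damage_breakdown
-- ===== SOURCE A (Python) =====
-- from typing import Any, Deque, Dict, Iterable, Iterator, Optional, Pattern
--
-- def parse_damage_breakdown(breakdown_str: str) -> Dict[str, int]:
--     """Parse the flexible damage breakdown string.
--
--     Example: '21 Physical 4 Divine 3 Fire 13 Positive Energy 1 Pure'
--
--     This implementation uses a regex to capture pairs of (number, damage type string)
--     where damage type may be multiple words.
--
--     Args:
--         breakdown_str: The damage breakdown portion of a log line
--
--     Returns:
--         Dictionary mapping damage type names to amounts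
--     """
--     damage_types: Dict[str, int] = {}
--     if not breakdown_str:
--         return damage_types
--
--     tokens = breakdown_str.split()
--     index = 0
--     token_count = len(tokens)
--     while index < token_count:
--         while index < token_count and not tokens[index].isdigit():
--             index += 1
--         if index >= token_count:
--             break
--
--         amount = int(tokens[index])
--         index += 1
--         type_start = index
--         while index < token_count and not tokens[index].isdigit():
--             index += 1
--         if type_start < index:
--             damage_types[" ".join(tokens[type_start:index])] = amount
--
--     return damage_types
-- ===== SOURCE B (Python) =====
-- def parse_damage_breakdown(breakdown_str):
--     """Single forward pass with a pending (amount, words) buffer flushed on each new number."""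
--     damage_types = {}
--     current_amount = None
--     words = []
--     for tok in breakdown_str.split():
--         if tok.isdigit():
--             if words:
--                 damage_types[" ".join(words)] = current_amount
--             current_amount = int(tok)
--             words = []
--         elif current_amount is not None:
--             words.append(tok)
--     if words:
--         damage_types[" ".join(words)] = current_amount
--     return damage_types
-- ===== Notes on version B (the rewrite author's own statement) =====
-- stated objective: alternative
-- what changed: Replaces A's index-driven nested while loops (skip-to-digit, then span the following non-digit run per pair) with a single forward fold over the tokens that keeps a pending (current_amount, words) buffer and flushes it whenever a new number token appears and once after the loop.
import Mathlib
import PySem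

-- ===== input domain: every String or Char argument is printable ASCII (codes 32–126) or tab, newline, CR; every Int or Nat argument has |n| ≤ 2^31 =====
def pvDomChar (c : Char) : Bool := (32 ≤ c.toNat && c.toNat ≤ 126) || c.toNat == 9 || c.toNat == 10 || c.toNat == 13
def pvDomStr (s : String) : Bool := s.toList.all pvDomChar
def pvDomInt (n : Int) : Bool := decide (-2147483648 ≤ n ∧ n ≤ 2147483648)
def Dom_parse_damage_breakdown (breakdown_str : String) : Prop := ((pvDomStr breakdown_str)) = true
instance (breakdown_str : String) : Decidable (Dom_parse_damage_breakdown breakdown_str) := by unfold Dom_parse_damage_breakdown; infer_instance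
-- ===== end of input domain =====

-- B replaces A's index-driven scan (skip-loop + span-loop per pair) with a single
-- forward fold keeping a pending (amount, words) buffer flushed at each new number;
-- objective: alternative decomposition, same O(n) cost.

-- ===== PORT A =====
-- int(tok): tok passed isdigit(), so ofStr? is always `some`; the 0 default is unreachable
def pvInt (t : String) : Int := (PySem.Int.ofStr? t).getD 0
def pvJoin (ws : List String) : String := PySem.Str.join " " ws

-- A's outer while loop: the inner skip-while is the leading non-digit step,
-- the inner type-collecting while is the takeWhile/dropWhile scan over the rest.
def pvALoop : List String → PySem.Dict String Int → PySem.Dict String Int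
  | [], d => d
  | t :: rest, d =>
    if PySem.Str.strIsdigit t = false then
      pvALoop rest d
    else
      let amount := pvInt t
      let typ := rest.takeWhile (fun s => !PySem.Str.strIsdigit s)
      let rest' := rest.dropWhile (fun s => !PySem.Str.strIsdigit s)
      if typ ≠ [] then pvALoop rest' (PySem.Dict.insert d (pvJoin typ) amount)
      else pvALoop rest' d
termination_by ts => ts.length
decreasing_by
  · simp
  · exact Nat.lt_succ_of_le (List.length_dropWhile_le _ _)
  · exact Nat.lt_succ_of_le (List.length_dropWhile_le _ _)

def parse_damage_breakdown (breakdown_str : String) : List (String × Int) :=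
  if breakdown_str = "" then []
  else (pvALoop (PySem.Str.split₀ breakdown_str) PySem.Dict.empty).items

-- ===== PORT B =====
-- state: (damage_types, current_amount, words); flush uses `.getD 0`, but the loop keeps
-- words empty while current_amount is none, so the default is unreachable
def pvBStep (st : PySem.Dict String Int × Option Int × List String) (t : String) :
    PySem.Dict String Int × Option Int × List String :=
  if PySem.Str.strIsdigit t then
    ((if st.2.2 ≠ [] then PySem.Dict.insert st.1 (pvJoin st.2.2) (st.2.1.getD 0) else st.1),
     some (pvInt t), [])
  else if st.2.1.isSome then (st.1, st.2.1, st.2.2 ++ [t])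
  else st

def pvBFinish (st : PySem.Dict String Int × Option Int × List String) : PySem.Dict String Int :=
  if st.2.2 ≠ [] then PySem.Dict.insert st.1 (pvJoin st.2.2) (st.2.1.getD 0) else st.1

def parse_damage_breakdown_alt (breakdown_str : String) : List (String × Int) :=
  (pvBFinish ((PySem.Str.split₀ breakdown_str).foldl pvBStep (PySem.Dict.empty, none, []))).items

-- ===== PRECONDITION & SPEC =====
def Spec_parse_damage_breakdown (breakdown_str : String) (out : List (String × Int)) : Prop := out = parse_damage_breakdown_alt breakdown_str
instance (breakdown_str : String) (out : List (String × Int)) : Decidable (Spec_parse_damage_breakdown breakdown_str out) := by unfold Spec_parse_damage_breakdown; infer_instance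

-- ===== CLAIM (what is proved, stated in full; the proofs are below) =====
def Claim_equal_parse_damage_breakdown : Prop := ∀ (breakdown_str : String), Dom_parse_damage_breakdown breakdown_str → Spec_parse_damage_breakdown breakdown_str (parse_damage_breakdown breakdown_str)

-- ===== LEMMAS AND PROOFS =====

-- proof-only helper: the conditional flush both programs perform
def pvFlush (d : PySem.Dict String Int) (a : Int) (ws : List String) : PySem.Dict String Int :=
  if ws ≠ [] then PySem.Dict.insert d (pvJoin ws) a else d

theorem pvALoop_cons_digit (t : String) (ts : List String) (d : PySem.Dict String Int)
    (hd : PySem.Str.strIsdigit t = true) :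
    pvALoop (t :: ts) d =
      pvALoop (ts.dropWhile (fun s => !PySem.Str.strIsdigit s))
        (pvFlush d (pvInt t) (ts.takeWhile (fun s => !PySem.Str.strIsdigit s))) := by
  rw [pvALoop]
  simp only [hd, Bool.true_eq_false, if_false, pvFlush]
  split_ifs <;> rfl

theorem pvALoop_cons_nondigit (t : String) (ts : List String) (d : PySem.Dict String Int)
    (hd : PySem.Str.strIsdigit t = false) :
    pvALoop (t :: ts) d = pvALoop ts d := by
  rw [pvALoop]
  simp only [hd, if_pos]

theorem pvBStep_digit (d : PySem.Dict String Int) (c : Option Int) (ws : List String)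
    (t : String) (hd : PySem.Str.strIsdigit t = true) :
    pvBStep (d, c, ws) t = (pvFlush d (c.getD 0) ws, some (pvInt t), []) := by
  simp only [pvBStep, pvFlush, hd, if_true]

theorem pvBStep_nondigit_some (d : PySem.Dict String Int) (a : Int) (ws : List String)
    (t : String) (hd : PySem.Str.strIsdigit t = false) :
    pvBStep (d, some a, ws) t = (d, some a, ws ++ [t]) := by
  simp only [pvBStep, hd, Bool.false_eq_true, if_false, Option.isSome_some, if_true]

theorem pvBStep_nondigit_none (d : PySem.Dict String Int) (t : String)
    (hd : PySem.Str.strIsdigit t = false) :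
    pvBStep (d, none, []) t = (d, none, []) := by
  simp only [pvBStep, hd, Bool.false_eq_true, if_false, Option.isSome_none]

theorem pvB_some (ts : List String) :
    ∀ (d : PySem.Dict String Int) (a : Int) (ws : List String),
    pvBFinish (ts.foldl pvBStep (d, some a, ws)) =
      pvALoop (ts.dropWhile (fun s => !PySem.Str.strIsdigit s))
        (pvFlush d a (ws ++ ts.takeWhile (fun s => !PySem.Str.strIsdigit s))) := by
  induction ts with
  | nil =>
    intro d a ws
    simp only [List.foldl_nil, List.dropWhile_nil, List.takeWhile_nil, List.append_nil, pvALoop]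
    simp only [pvBFinish, pvFlush, Option.getD_some]
  | cons t ts ih =>
    intro d a ws
    by_cases hd : PySem.Str.strIsdigit t = true
    · rw [List.foldl_cons, pvBStep_digit d (some a) ws t hd, Option.getD_some, ih,
        List.dropWhile_cons, List.takeWhile_cons]
      simp only [hd, Bool.not_true, Bool.false_eq_true, if_false, List.nil_append, List.append_nil]
      rw [pvALoop_cons_digit t ts (pvFlush d a ws) hd]
    · have hd' : PySem.Str.strIsdigit t = false := by simpa using hd
      rw [List.foldl_cons, pvBStep_nondigit_some d a ws t hd', ih,
        List.dropWhile_cons, List.takeWhile_cons]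
      simp only [hd', Bool.not_false, if_true, List.append_assoc, List.singleton_append]

theorem pvB_none (ts : List String) :
    ∀ (d : PySem.Dict String Int),
    pvBFinish (ts.foldl pvBStep (d, none, [])) = pvALoop ts d := by
  induction ts with
  | nil => intro d; simp only [List.foldl_nil, pvBFinish, pvALoop]; rfl
  | cons t ts ih =>
    intro d
    by_cases hd : PySem.Str.strIsdigit t = true
    · rw [List.foldl_cons, pvBStep_digit d none [] t hd]
      have hfl : pvFlush d ((none : Option Int).getD 0) [] = d := by simp [pvFlush]
      rw [hfl, pvB_some, List.nil_append, pvALoop_cons_digit t ts d hd]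
    · have hd' : PySem.Str.strIsdigit t = false := by simpa using hd
      rw [List.foldl_cons, pvBStep_nondigit_none d t hd', ih,
        pvALoop_cons_nondigit t ts d hd']

-- ===== VERDICT (by name: the statement is the Claim_ definition above) =====
theorem parse_damage_breakdown_spec : Claim_equal_parse_damage_breakdown := by
  intro s _
  show parse_damage_breakdown s = parse_damage_breakdown_alt s
  by_cases h : s = ""
  · subst h; decide
  · unfold parse_damage_breakdown parse_damage_breakdown_alt
    rw [if_neg h, pvB_none]
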